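-- pv_equiv track=rewrite | github.com/henwenrou/TTA | DCON/scripts/failure_analysis/recommend_constraints.py | choose_single_module
-- ===== SOURCE A (Python) =====
-- from typing import Dict, List, Sequence
--
-- def choose_single_module(selected: List[Dict[str, object]]) -> str:
--     """Choose one module if implementation bandwidth is limited."""
--
--     triggers = [str(item["trigger"]) for item in selected]
--     if "absent_hallucination" in triggers or "fp_dominant" in triggers:
--         return "Presence-aware auxiliary head + class-presence gate"
--     if "fragmentation" in triggers or "topology_suspicious" in triggers:
--         return "Anatomy reliability regularization + topology/component reliability gate"
--     if "over_segmentation" in triggers: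
--         return "Source-calibrated area prior + area-ratio reliability gate"
--     if "small_organ_failure" in triggers:
--         return "Small-organ reliability weighting + prototype-based enhancement"
--     if "fn_dominant" in triggers:
--         return "Prototype-guided foreground recovery"
--     return "Reliability-gated TTA loss"
-- ===== SOURCE B (Python) =====
-- PRIORITY = {
--     "absent_hallucination": 0,
--     "fp_dominant": 0,
--     "fragmentation": 1,
--     "topology_suspicious": 1,
--     "over_segmentation": 2,
--     "small_organ_failure": 3,
--     "fn_dominant": 4,
-- }
--
-- RECOMMENDATIONS = [
--     "Presence-aware auxiliary head + class-presence gate",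
--     "Anatomy reliability regularization + topology/component reliability gate",
--     "Source-calibrated area prior + area-ratio reliability gate",
--     "Small-organ reliability weighting + prototype-based enhancement",
--     "Prototype-guided foreground recovery",
--     "Reliability-gated TTA loss",
-- ]
--
--
-- def choose_single_module(selected):
--     """Choose one module if implementation bandwidth is limited."""
--     best = 5
--     for item in selected:
--         rank = PRIORITY.get(str(item["trigger"]), 5)
--         if rank < best:
--             best = rank
--     return RECOMMENDATIONS[best]
-- ===== Notes on version B (the rewrite author's own statement) =====
-- stated objective: alternative
-- what changed: Replaces the if-chain of membership tests with a numeric reduction: each trigger is mapped through a priority dict to a rank, a single pass keeps the minimum rank, and the result indexes a table of recommendations (rank 5 = default).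
import Mathlib
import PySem

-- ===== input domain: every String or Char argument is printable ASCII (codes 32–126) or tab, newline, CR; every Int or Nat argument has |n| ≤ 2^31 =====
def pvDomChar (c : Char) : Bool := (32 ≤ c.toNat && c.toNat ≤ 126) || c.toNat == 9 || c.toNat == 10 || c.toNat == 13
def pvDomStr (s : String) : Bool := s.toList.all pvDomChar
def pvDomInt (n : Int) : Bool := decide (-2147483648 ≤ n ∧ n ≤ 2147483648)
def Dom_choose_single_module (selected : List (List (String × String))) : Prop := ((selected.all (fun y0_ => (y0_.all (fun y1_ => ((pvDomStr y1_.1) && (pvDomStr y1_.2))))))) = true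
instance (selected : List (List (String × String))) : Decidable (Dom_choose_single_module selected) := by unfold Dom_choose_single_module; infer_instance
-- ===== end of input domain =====

-- B replaces A's if-chain of membership tests by a min-rank reduction over a priority
-- dict plus a table lookup; equivalence of the return value is proved on Pre_ (key present).

-- shared lookup: str(item["trigger"]) — dict lookup, none = KeyError (both Pythons raise there)
def csmTrigOf (item : List (String × String)) : Option String :=
  (PySem.Dict.mk item).get? "trigger"

-- ===== PORT A =====
def choose_single_module (selected : List (List (String × String))) : String :=
  match selected.mapM csmTrigOf with
  | none => ""  -- KeyError in the list comprehension; excluded by Pre_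
  | some triggers =>
    if triggers.contains "absent_hallucination" || triggers.contains "fp_dominant" then
      "Presence-aware auxiliary head + class-presence gate"
    else if triggers.contains "fragmentation" || triggers.contains "topology_suspicious" then
      "Anatomy reliability regularization + topology/component reliability gate"
    else if triggers.contains "over_segmentation" then
      "Source-calibrated area prior + area-ratio reliability gate"
    else if triggers.contains "small_organ_failure" then
      "Small-organ reliability weighting + prototype-based enhancement"
    else if triggers.contains "fn_dominant" then
      "Prototype-guided foreground recovery"
    else
      "Reliability-gated TTA loss"

-- ===== PORT B =====
-- the PRIORITY dict of Source B
def csmPriority : PySem.Dict String Nat :=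
  PySem.Dict.mk
    [ ("absent_hallucination", 0), ("fp_dominant", 0),
      ("fragmentation", 1), ("topology_suspicious", 1),
      ("over_segmentation", 2), ("small_organ_failure", 3), ("fn_dominant", 4) ]

-- the RECOMMENDATIONS table of Source B (index 5 = default)
def csmRecs : List String :=
  [ "Presence-aware auxiliary head + class-presence gate",
    "Anatomy reliability regularization + topology/component reliability gate",
    "Source-calibrated area prior + area-ratio reliability gate",
    "Small-organ reliability weighting + prototype-based enhancement",
    "Prototype-guided foreground recovery",
    "Reliability-gated TTA loss" ]

-- the for-loop of Source B: keep the minimum rank; none = KeyError mid-loop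
def csmLoop : List (List (String × String)) → Nat → Option Nat
  | [], best => some best
  | item :: rest, best =>
    match csmTrigOf item with
    | none => none
    | some t =>
      let rank := csmPriority.getD t 5
      csmLoop rest (if rank < best then rank else best)

def choose_single_module_alt (selected : List (List (String × String))) : String :=
  match csmLoop selected 5 with
  | none => ""  -- KeyError; excluded by Pre_
  | some best => csmRecs.getD best ""

-- ===== PRECONDITION & SPEC =====
-- Pre_: every item has the key "trigger"; otherwise both Pythons raise KeyError.
def Pre_choose_single_module (selected : List (List (String × String))) : Prop :=
  (selected.all (fun item => item.any (fun kv => kv.1 == "trigger"))) = true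
instance (selected : List (List (String × String))) : Decidable (Pre_choose_single_module selected) := by
  unfold Pre_choose_single_module; infer_instance

def pvWitness_choose_single_module : (List (List (String × String))) :=
  [[("trigger", "fn_dominant")], [("trigger", "over_segmentation"), ("note", "x")]]

def Spec_choose_single_module (selected : List (List (String × String))) (out : String) : Prop := out = choose_single_module_alt selected
instance (selected : List (List (String × String))) (out : String) : Decidable (Spec_choose_single_module selected out) := by unfold Spec_choose_single_module; infer_instance

-- ===== CLAIM (what is proved, stated in full; the proofs are below) =====
def Claim_equal_choose_single_module : Prop := ∀ (selected : List (List (String × String))), Dom_choose_single_module selected → Pre_choose_single_module selected → Spec_choose_single_module selected (choose_single_module selected)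

-- ===== LEMMAS AND PROOFS =====

-- the rank of a single trigger, as an if-chain
def csmRank (t : String) : Nat := csmPriority.getD t 5

theorem csmRank_eq (t : String) :
    csmRank t =
      if "absent_hallucination" = t then 0
      else if "fp_dominant" = t then 0
      else if "fragmentation" = t then 1
      else if "topology_suspicious" = t then 1
      else if "over_segmentation" = t then 2
      else if "small_organ_failure" = t then 3
      else if "fn_dominant" = t then 4
      else 5 := by
  simp only [csmRank, csmPriority, PySem.Dict.getD_eq_get?_getD, PySem.Dict.get?_mk_cons,
             beq_iff_eq]
  split_ifs <;> simp [PySem.Dict.get?]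

-- the loop equals: map to triggers, then fold the min rank
theorem csmLoop_eq (sel : List (List (String × String))) (best : Nat) :
    csmLoop sel best =
      (sel.mapM csmTrigOf).map
        (fun ts => ts.foldl (fun b t => if csmRank t < b then csmRank t else b) best) := by
  induction sel generalizing best with
  | nil => rfl
  | cons item rest ih =>
    simp only [csmLoop, List.mapM_cons]
    cases csmTrigOf item with
    | none => rfl
    | some t =>
      simp only [ih, csmRank]
      cases rest.mapM csmTrigOf <;> simp [List.foldl]

-- characterization of the min-rank fold
theorem csmFold_le (ts : List String) (best k : Nat) :
    (ts.foldl (fun b t => if csmRank t < b then csmRank t else b) best ≤ k) ↔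
      (best ≤ k ∨ ∃ t ∈ ts, csmRank t ≤ k) := by
  induction ts generalizing best with
  | nil => simp
  | cons t rest ih =>
    simp only [List.foldl_cons, ih, List.mem_cons]
    constructor
    · rintro (h | ⟨u, hu, hk⟩)
      · split_ifs at h with hlt
        · exact Or.inr ⟨t, Or.inl rfl, h⟩
        · exact Or.inl h
      · exact Or.inr ⟨u, Or.inr hu, hk⟩
    · rintro (h | ⟨u, hu, hk⟩)
      · split_ifs with hlt
        · exact Or.inl (le_trans (le_of_lt hlt) h)
        · exact Or.inl h
      · rcases hu with rfl | hu
        · left; split_ifs with hlt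
          · exact hk
          · exact le_trans (not_lt.mp hlt) hk
        · exact Or.inr ⟨u, hu, hk⟩

theorem csmFold_le_five (ts : List String) :
    ts.foldl (fun b t => if csmRank t < b then csmRank t else b) 5 ≤ 5 :=
  (csmFold_le ts 5 5).mpr (Or.inl le_rfl)

-- which contains-facts a rank bound is equivalent to
theorem csmExists_rank_le (triggers : List String) (k : Nat) (hk : k < 5) :
    (∃ t ∈ triggers, csmRank t ≤ k) ↔
      ((triggers.contains "absent_hallucination" = true ∨ triggers.contains "fp_dominant" = true)
       ∨ (1 ≤ k ∧ (triggers.contains "fragmentation" = true ∨ triggers.contains "topology_suspicious" = true))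
       ∨ (2 ≤ k ∧ triggers.contains "over_segmentation" = true)
       ∨ (3 ≤ k ∧ triggers.contains "small_organ_failure" = true)
       ∨ (4 ≤ k ∧ triggers.contains "fn_dominant" = true)) := by
  simp only [List.contains_iff_mem]
  constructor
  · rintro ⟨t, ht, hle⟩
    rw [csmRank_eq] at hle
    split_ifs at hle with h1 h2 h3 h4 h5 h6 h7 <;>
      [exact Or.inl (Or.inl (h1 ▸ ht));
       exact Or.inl (Or.inr (h2 ▸ ht));
       exact Or.inr (Or.inl ⟨hle, Or.inl (h3 ▸ ht)⟩);
       exact Or.inr (Or.inl ⟨hle, Or.inr (h4 ▸ ht)⟩);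
       exact Or.inr (Or.inr (Or.inl ⟨hle, h5 ▸ ht⟩));
       exact Or.inr (Or.inr (Or.inr (Or.inl ⟨hle, h6 ▸ ht⟩)));
       exact Or.inr (Or.inr (Or.inr (Or.inr ⟨hle, h7 ▸ ht⟩)));
       omega]
  · rintro ((ht | ht) | ⟨hk1, ht | ht⟩ | ⟨hk2, ht⟩ | ⟨hk3, ht⟩ | ⟨hk4, ht⟩)
    · exact ⟨_, ht, by rw [csmRank_eq]; simp⟩
    · exact ⟨_, ht, by rw [csmRank_eq]; simp⟩
    · exact ⟨_, ht, by rw [csmRank_eq]; simp [hk1]⟩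
    · exact ⟨_, ht, by rw [csmRank_eq]; simp [hk1]⟩
    · exact ⟨_, ht, by rw [csmRank_eq]; simp [hk2]⟩
    · exact ⟨_, ht, by rw [csmRank_eq]; simp [hk3]⟩
    · exact ⟨_, ht, by rw [csmRank_eq]; simp [hk4]⟩

-- ===== VERDICT (by name: the statement is the Claim_ definition above) =====
theorem choose_single_module_spec : Claim_equal_choose_single_module := by
  intro selected hdom hpre
  clear hdom hpre
  unfold Spec_choose_single_module choose_single_module choose_single_module_alt
  rw [csmLoop_eq]
  cases h : selected.mapM csmTrigOf with
  | none => rfl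
  | some triggers =>
    simp only [Option.map_some]
    clear h
    have h5 := csmFold_le_five triggers
    have e0 := (csmFold_le triggers 5 0).trans
      ((or_iff_right (by omega)).trans (csmExists_rank_le triggers 0 (by omega)))
    have e1 := (csmFold_le triggers 5 1).trans
      ((or_iff_right (by omega)).trans (csmExists_rank_le triggers 1 (by omega)))
    have e2 := (csmFold_le triggers 5 2).trans
      ((or_iff_right (by omega)).trans (csmExists_rank_le triggers 2 (by omega)))
    have e3 := (csmFold_le triggers 5 3).trans
      ((or_iff_right (by omega)).trans (csmExists_rank_le triggers 3 (by omega)))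
    have e4 := (csmFold_le triggers 5 4).trans
      ((or_iff_right (by omega)).trans (csmExists_rank_le triggers 4 (by omega)))
    norm_num at e0 e1 e2 e3 e4
    generalize hmm : triggers.foldl (fun b t => if csmRank t < b then csmRank t else b) 5 = m
      at h5 e0 e1 e2 e3 e4 ⊢
    interval_cases m
    · rcases e0.mp rfl with hA | hB
      · simp [hA, csmRecs]
      · simp [hB, csmRecs]
    · have nA : "absent_hallucination" ∉ triggers := fun hh => absurd (e0.mpr (Or.inl hh)) (by decide)
      have nB : "fp_dominant" ∉ triggers := fun hh => absurd (e0.mpr (Or.inr hh)) (by decide)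
      rcases (e1.mp le_rfl).resolve_left (fun h => h.elim nA nB) with hF | hT
      · simp [nA, nB, hF, csmRecs]
      · simp [nA, nB, hT, csmRecs]
    · have nA : "absent_hallucination" ∉ triggers := fun hh => absurd (e0.mpr (Or.inl hh)) (by decide)
      have nB : "fp_dominant" ∉ triggers := fun hh => absurd (e0.mpr (Or.inr hh)) (by decide)
      have nF : "fragmentation" ∉ triggers := fun hh => absurd (e1.mpr (Or.inr (Or.inl hh))) (by decide)
      have nT : "topology_suspicious" ∉ triggers := fun hh => absurd (e1.mpr (Or.inr (Or.inr hh))) (by decide)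
      have hO := ((e2.mp le_rfl).resolve_left (fun h => h.elim nA nB)).resolve_left
        (fun h => h.elim nF nT)
      simp [nA, nB, nF, nT, hO, csmRecs]
    · have nA : "absent_hallucination" ∉ triggers := fun hh => absurd (e0.mpr (Or.inl hh)) (by decide)
      have nB : "fp_dominant" ∉ triggers := fun hh => absurd (e0.mpr (Or.inr hh)) (by decide)
      have nF : "fragmentation" ∉ triggers := fun hh => absurd (e1.mpr (Or.inr (Or.inl hh))) (by decide)
      have nT : "topology_suspicious" ∉ triggers := fun hh => absurd (e1.mpr (Or.inr (Or.inr hh))) (by decide)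
      have nO : "over_segmentation" ∉ triggers := fun hh => absurd (e2.mpr (Or.inr (Or.inr hh))) (by decide)
      have hS := (((e3.mp le_rfl).resolve_left (fun h => h.elim nA nB)).resolve_left
        (fun h => h.elim nF nT)).resolve_left nO
      simp [nA, nB, nF, nT, nO, hS, csmRecs]
    · have nA : "absent_hallucination" ∉ triggers := fun hh => absurd (e0.mpr (Or.inl hh)) (by decide)
      have nB : "fp_dominant" ∉ triggers := fun hh => absurd (e0.mpr (Or.inr hh)) (by decide)
      have nF : "fragmentation" ∉ triggers := fun hh => absurd (e1.mpr (Or.inr (Or.inl hh))) (by decide)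
      have nT : "topology_suspicious" ∉ triggers := fun hh => absurd (e1.mpr (Or.inr (Or.inr hh))) (by decide)
      have nO : "over_segmentation" ∉ triggers := fun hh => absurd (e2.mpr (Or.inr (Or.inr hh))) (by decide)
      have nS : "small_organ_failure" ∉ triggers := fun hh => absurd (e3.mpr (Or.inr (Or.inr (Or.inr hh)))) (by decide)
      have hN := ((((e4.mp le_rfl).resolve_left (fun h => h.elim nA nB)).resolve_left
        (fun h => h.elim nF nT)).resolve_left nO).resolve_left nS
      simp [nA, nB, nF, nT, nO, nS, hN, csmRecs]
    · have nA : "absent_hallucination" ∉ triggers := fun hh => absurd (e0.mpr (Or.inl hh)) (by decide)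
      have nB : "fp_dominant" ∉ triggers := fun hh => absurd (e0.mpr (Or.inr hh)) (by decide)
      have nF : "fragmentation" ∉ triggers := fun hh => absurd (e1.mpr (Or.inr (Or.inl hh))) (by decide)
      have nT : "topology_suspicious" ∉ triggers := fun hh => absurd (e1.mpr (Or.inr (Or.inr hh))) (by decide)
      have nO : "over_segmentation" ∉ triggers := fun hh => absurd (e2.mpr (Or.inr (Or.inr hh))) (by decide)
      have nS : "small_organ_failure" ∉ triggers := fun hh => absurd (e3.mpr (Or.inr (Or.inr (Or.inr hh)))) (by decide)
      have nN : "fn_dominant" ∉ triggers := fun hh => absurd (e4.mpr (Or.inr (Or.inr (Or.inr (Or.inr hh))))) (by decide)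
      simp [nA, nB, nF, nT, nO, nS, nN, csmRecs]
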